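-- pv_equiv track=rewrite | github.com/DCC-CC4401/2021-2-Grupo-1 | juwuegowos/juwuegowosApp/views.py | parse
-- ===== SOURCE A (Python) =====
-- def parse(search):
--     word_list = search.replace(',',' ').replace(';',' ').split()
--     name_w = []
--     tags = []
--     dev = ''
--     for w in word_list:
--         if '#' in w:
--             tags += [w[1:]]
--         elif '@' in w:
--             dev = w[1:]
--         else:
--             name_w += [w]
--     name = ' '.join(name_w)
--     return name, tags, dev
-- ===== SOURCE B (Python) =====
-- def parse(search):
--     # One-pass character scanner: tokenizes and classifies words in a single
--     # traversal of the raw string, tracking hash/at-sign flags while the word is built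
--     # (no replace/split passes, no substring searches over finished words).
--     DELIMS = ' \t\n\r\x0b\x0c,;'
--
--     def emit(np, tg, dv, cur, hh, ha):
--         if hh:
--             return np, tg + [''.join(cur[1:])], dv
--         if ha:
--             return np, tg, ''.join(cur[1:])
--         return np + [''.join(cur)], tg, dv
--
--     np, tg, dv = [], [], ''
--     cur, hh, ha = [], False, False
--     for c in search:
--         if c in DELIMS:
--             if cur:
--                 np, tg, dv = emit(np, tg, dv, cur, hh, ha)
--                 cur, hh, ha = [], False, False
--         else:
--             cur.append(c)
--             hh = hh or c == '#'
--             ha = ha or c == '@'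
--     if cur:
--         np, tg, dv = emit(np, tg, dv, cur, hh, ha)
--     return ' '.join(np), tg, dv
-- ===== Notes on version B (the rewrite author's own statement) =====
-- stated objective: alternative
-- what changed: Replaced A's three-pass pipeline (two replace passes, a split pass, then a word loop with substring tests) by a single character-level scanner that tokenizes on a delimiter set and classifies each word via hash/at-sign flags maintained while the word is being built.
import Mathlib
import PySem

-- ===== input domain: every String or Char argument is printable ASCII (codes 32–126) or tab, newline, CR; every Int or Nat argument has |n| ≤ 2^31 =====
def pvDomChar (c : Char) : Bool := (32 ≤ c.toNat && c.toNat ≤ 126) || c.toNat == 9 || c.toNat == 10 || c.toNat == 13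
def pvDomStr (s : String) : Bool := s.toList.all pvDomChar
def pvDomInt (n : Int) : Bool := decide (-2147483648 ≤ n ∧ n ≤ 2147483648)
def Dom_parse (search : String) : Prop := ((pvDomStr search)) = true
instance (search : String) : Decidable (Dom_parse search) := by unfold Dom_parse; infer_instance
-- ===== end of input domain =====

-- B replaces A's replace/replace/split pipeline plus word-classification loop by a single
-- character-level scanner with hash/at-sign flags (alternative decomposition, same asymptotic cost).

-- ===== PORT A =====
-- A's loop body, factored as a helper (same branches, same order).
def parseStep (st : List String × List String × String) (w : String) :
    List String × List String × String :=
  if PySem.Str.isIn "#" w then (st.1, st.2.1 ++ [PySem.Str.slice w (some 1) none], st.2.2)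
  else if PySem.Str.isIn "@" w then (st.1, st.2.1, PySem.Str.slice w (some 1) none)
  else (st.1 ++ [w], st.2.1, st.2.2)

def parse (search : String) : String × List String × String :=
  let word_list := PySem.Str.split₀ (PySem.Str.replace (PySem.Str.replace search "," " ") ";" " ")
  let st := word_list.foldl parseStep ([], [], "")
  (PySem.Str.join " " st.1, st.2.1, st.2.2)

-- ===== PORT B =====
-- Source B's `c in DELIMS` with DELIMS = ' \t\n\r\x0b\x0c,;'
def pvDelim (c : Char) : Bool :=
  [' ', '\t', '\n', '\r', '\x0b', '\x0c', ',', ';'].contains c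

-- Source B's `emit`: classify the finished word by the flags gathered while scanning it.
def pvEmit (np tg : List String) (dv : String) (cur : List Char) (hh ha : Bool) :
    List String × List String × String :=
  if hh then (np, tg ++ [String.ofList (PySem.List.slice cur (some 1) none)], dv)
  else if ha then (np, tg, String.ofList (PySem.List.slice cur (some 1) none))
  else (np ++ [String.ofList cur], tg, dv)

-- Source B's loop: one pass over the characters, building the current word and its flags.
def parseAltGo : List Char → List String → List String → String → List Char → Bool → Bool →
    List String × List String × String
  | [], np, tg, dv, cur, hh, ha =>
      if cur.isEmpty then (np, tg, dv) else pvEmit np tg dv cur hh ha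
  | c :: rest, np, tg, dv, cur, hh, ha =>
      if pvDelim c then
        if cur.isEmpty then parseAltGo rest np tg dv cur hh ha
        else
          match pvEmit np tg dv cur hh ha with
          | (np', tg', dv') => parseAltGo rest np' tg' dv' [] false false
      else parseAltGo rest np tg dv (cur ++ [c]) (hh || c == '#') (ha || c == '@')

def parse_alt (search : String) : String × List String × String :=
  match parseAltGo search.toList [] [] "" [] false false with
  | (np, tg, dv) => (PySem.Str.join " " np, tg, dv)

-- ===== PRECONDITION & SPEC =====
def Spec_parse (search : String) (out : String × List String × String) : Prop := out = parse_alt search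
instance (search : String) (out : String × List String × String) : Decidable (Spec_parse search out) := by unfold Spec_parse; infer_instance

-- ===== CLAIM (what is proved, stated in full; the proofs are below) =====
def Claim_equal_parse : Prop := ∀ (search : String), Dom_parse search → Spec_parse search (parse search)

-- ===== LEMMAS AND PROOFS =====

-- what A's two single-character replaces do to one character
def pvSub (c : Char) : Char := if c == ',' then ' ' else if c == ';' then ' ' else c

theorem pvCharEq (c : Char) (k : Nat) (h : c.toNat = k) : c = Char.ofNat k := by
  have := Char.ofNat_toNat c
  rw [h] at this
  exact this.symm

theorem replaceGo_single (a b : Char) (l : List Char) :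
    ∀ (fuel : Nat) (acc : List Char), l.length ≤ fuel →
    PySem.Chars.replace.go [a] [b] fuel l acc
      = acc.reverse ++ l.map (fun c => if c == a then b else c) := by
  induction l with
  | nil => intro fuel acc _; cases fuel <;> simp [PySem.Chars.replace.go]
  | cons c t ih =>
      intro fuel acc hle
      cases fuel with
      | zero => simp at hle
      | succ fuel =>
          simp only [List.length_cons, Nat.succ_le_succ_iff] at hle
          rcases h : (a == c) with _ | _
          · have hne : c ≠ a := by intro e; subst e; simp at h
            rw [PySem.Chars.replace.go]
            simp only [List.isPrefixOf, h, Bool.false_and]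
            rw [ih fuel (c :: acc) hle]
            simp [hne]
          · have he : c = a := ((beq_iff_eq).1 h).symm
            rw [PySem.Chars.replace.go]
            simp only [List.isPrefixOf, h, Bool.true_and,
              List.length_cons, List.length_nil, List.drop_succ_cons, List.drop_zero,
              List.reverse_cons, List.reverse_nil, List.nil_append, List.singleton_append, if_true]
            rw [ih fuel (b :: acc) hle]
            simp [he]

theorem replace_single (a b : Char) (l : List Char) :
    PySem.Chars.replace l [a] [b] = l.map (fun c => if c == a then b else c) := by
  simp [PySem.Chars.replace, replaceGo_single a b l l.length [] le_rfl]

theorem split0_go_acc (l : List Char) :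
    ∀ (cur : List Char) (acc : List (List Char)),
    PySem.Chars.split₀.go l cur acc = acc.reverse ++ PySem.Chars.split₀.go l cur [] := by
  induction l with
  | nil =>
      intro cur acc
      rw [PySem.Chars.split₀.go.eq_def]
      conv_rhs => rw [PySem.Chars.split₀.go.eq_def]
      rcases h : cur.isEmpty <;> simp [h]
  | cons c t ih =>
      intro cur acc
      rw [PySem.Chars.split₀.go.eq_def]
      conv_rhs => rw [PySem.Chars.split₀.go.eq_def]
      rcases hs : PySem.Chars.isspace c <;> rcases hc : cur.isEmpty <;>
        simp only [hs, hc]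
      · exact ih _ _
      · exact ih _ _
      · rw [ih [] (cur.reverse :: acc), ih [] [cur.reverse]]
        simp
      · exact ih _ _

theorem isspace_sub (c : Char) (hd : pvDomChar c = true) :
    PySem.Chars.isspace (pvSub c) = pvDelim c := by
  rcases h : pvDelim c with _ | _
  · simp only [pvDelim, List.contains_eq_mem, decide_eq_false_iff_not, List.mem_cons,
      List.not_mem_nil, or_false, not_or] at h
    obtain ⟨h1, h2, h3, h4, h5, h6, h7, h8⟩ := h
    have hsub : pvSub c = c := by
      simp only [pvSub]
      rw [if_neg (by simp [h7]), if_neg (by simp [h8])]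
    rw [hsub]
    simp only [pvDomChar, Bool.or_eq_true, Bool.and_eq_true, decide_eq_true_eq, beq_iff_eq] at hd
    have e1 : c.toNat ≠ 32 := fun e => h1 (by rw [pvCharEq c 32 e])
    have e2 : c.toNat ≠ 9 := fun e => h2 (by rw [pvCharEq c 9 e])
    have e3 : c.toNat ≠ 10 := fun e => h3 (by rw [pvCharEq c 10 e])
    have e4 : c.toNat ≠ 13 := fun e => h4 (by rw [pvCharEq c 13 e])
    have e5 : c.toNat ≠ 11 := fun e => h5 (by rw [pvCharEq c 11 e])
    have e6 : c.toNat ≠ 12 := fun e => h6 (by rw [pvCharEq c 12 e])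
    simp only [PySem.Chars.isspace, Bool.or_eq_false_iff, Bool.and_eq_false_iff,
      decide_eq_false_iff_not]
    omega
  · simp only [pvDelim, List.contains_eq_mem, decide_eq_true_eq, List.mem_cons,
      List.not_mem_nil, or_false] at h
    rcases h with rfl | rfl | rfl | rfl | rfl | rfl | rfl | rfl <;> decide

theorem isIn_singleton (a : Char) (l : List Char) : PySem.Chars.isIn [a] l = l.contains a := by
  rcases h : l.contains a with _ | _
  · rw [PySem.Chars.isIn_eq_false_iff, List.singleton_infix_iff]
    simpa using h
  · rw [(PySem.Chars.isIn_iff_infix [a] l).2 ((List.singleton_infix_iff a l).2 (by simpa using h))]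

theorem emit_eq_step (np tg : List String) (dv : String) (cur : List Char) :
    pvEmit np tg dv cur (cur.contains '#') (cur.contains '@')
      = parseStep (np, tg, dv) (String.ofList cur) := by
  rcases h1 : cur.contains '#' <;> rcases h2 : cur.contains '@' <;>
    simp only [List.contains_eq_mem, decide_eq_false_iff_not, decide_eq_true_eq] at h1 h2 <;>
    simp [pvEmit, parseStep, PySem.Str.isIn, PySem.Str.slice, PySem.Chars.slice,
      isIn_singleton, List.contains_eq_mem, h1, h2]

theorem contains_append_singleton (cur : List Char) (c a : Char) :
    (cur ++ [c]).contains a = (cur.contains a || c == a) := by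
  have : (c == a) = decide (a = c) := by
    by_cases e : a = c
    · subst e; simp
    · have hca : c ≠ a := fun x => e x.symm
      simp [hca, e]
  rw [this]
  simp [List.contains_eq_mem]

theorem parseAltGo_spec (cs : List Char) :
    ∀ (np tg : List String) (dv : String) (cur : List Char),
    cs.all pvDomChar = true →
    parseAltGo cs np tg dv cur (cur.contains '#') (cur.contains '@')
      = ((PySem.Chars.split₀.go (cs.map pvSub) cur.reverse []).map String.ofList).foldl
          parseStep (np, tg, dv) := by
  induction cs with
  | nil =>
      intro np tg dv cur _
      rcases hc : cur.isEmpty with _ | _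
      · simp only [parseAltGo, List.map_nil, PySem.Chars.split₀.go.eq_def,
          List.isEmpty_reverse, hc, if_false, List.reverse_reverse, List.reverse_nil,
          Bool.false_eq_true]
        have := emit_eq_step np tg dv cur
        simpa [List.contains_eq_mem] using this
      · have : cur = [] := List.isEmpty_iff.1 hc
        subst this
        simp [parseAltGo, PySem.Chars.split₀.go.eq_def]
  | cons c rest ih =>
      intro np tg dv cur hall
      simp only [List.all_cons, Bool.and_eq_true] at hall
      obtain ⟨hdc, hrest⟩ := hall
      rw [parseAltGo, List.map_cons, PySem.Chars.split₀.go.eq_def]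
      simp only [isspace_sub c hdc]
      rcases hd : pvDelim c with _ | _
      · -- not a delimiter: push the character
        have hsub : pvSub c = c := by
          simp only [pvDelim, List.contains_eq_mem, decide_eq_false_iff_not, List.mem_cons,
            List.not_mem_nil, or_false, not_or] at hd
          simp only [pvSub]
          rw [if_neg (by simp [hd.2.2.2.2.2.2.1]), if_neg (by simp [hd.2.2.2.2.2.2.2])]
        simp only [hsub]
        have h1 := contains_append_singleton cur c '#'
        have h2 := contains_append_singleton cur c '@'
        rw [← h1, ← h2, ih np tg dv (cur ++ [c]) hrest]
        simp
      · -- delimiter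
        simp only [if_true]
        rcases hc : cur.isEmpty with _ | _
        · -- flush
          simp only [List.isEmpty_reverse, hc, Bool.false_eq_true, if_false,
            List.reverse_reverse]
          rw [split0_go_acc _ [] [cur]]
          simp only [List.reverse_cons, List.reverse_nil, List.nil_append,
            List.singleton_append, List.map_cons, List.foldl_cons]
          rw [← emit_eq_step]
          rcases hst : pvEmit np tg dv cur (cur.contains '#') (cur.contains '@') with ⟨np', tg', dv'⟩
          have := ih np' tg' dv' [] hrest
          simpa using this
        · have : cur = [] := List.isEmpty_iff.1 hc
          subst this
          simp only [hc, if_true, List.reverse_nil]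
          exact ih np tg dv [] hrest

theorem sub_comp (c : Char) :
    (if (if c == ',' then ' ' else c) == ';' then ' ' else (if c == ',' then ' ' else c))
      = pvSub c := by
  rcases h1 : (c == ',') with _ | _ <;> rcases h2 : (c == ';') with _ | _ <;>
    simp [pvSub, h1, h2]

-- ===== VERDICT (by name: the statement is the Claim_ definition above) =====
theorem parse_spec : Claim_equal_parse := by
  intro search hdom
  unfold Spec_parse parse parse_alt
  have hwords : PySem.Str.split₀ (PySem.Str.replace (PySem.Str.replace search "," " ") ";" " ")
      = (PySem.Chars.split₀.go (search.toList.map pvSub) [] []).map String.ofList := by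
    simp only [PySem.Str.split₀, PySem.Str.replace, String.toList_ofList]
    have hcomma : ("," : String).toList = [','] := rfl
    have hsemi : (";" : String).toList = [';'] := rfl
    have hspace : (" " : String).toList = [' '] := rfl
    rw [hcomma, hsemi, hspace, replace_single, replace_single, List.map_map]
    have : ((fun c => if c == ';' then ' ' else c) ∘ fun c => if c == ',' then ' ' else c)
        = pvSub := by
      funext c
      simpa using sub_comp c
    rw [this, PySem.Chars.split₀]
  have hB := parseAltGo_spec search.toList [] [] "" [] hdom
  simp only [List.contains_nil, List.reverse_nil] at hB
  rw [hwords, hB]
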